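-- pv_equiv track=rewrite | github.com/Panagiotis-Zachos/project-euler-solutions | summation_of_primes.py | powerOfTwo
-- ===== SOURCE A (Python) =====
-- def powerOfTwo(n):
--     r = 0
--     d = n
--     while(d%2==0):
--         r += 1
--         d >>= 1
--     assert(2**r * d == n)
--     return r, d
-- ===== SOURCE B (Python) =====
-- def powerOfTwo(n):
--     r = (n & -n).bit_length() - 1
--     d = n >> r
--     return r, d
-- ===== Notes on version B (the rewrite author's own statement) =====
-- stated objective: alternative
-- what changed: Replaces the bit-by-bit stripping loop with a closed-form computation: n & -n isolates the lowest set bit, its bit_length gives the 2-adic valuation r, and a single shift n >> r yields the odd part.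
-- outside the precondition, e.g. on powerOfTwo(0): A does not finish within the time limit, B raises ValueError
import Mathlib
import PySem

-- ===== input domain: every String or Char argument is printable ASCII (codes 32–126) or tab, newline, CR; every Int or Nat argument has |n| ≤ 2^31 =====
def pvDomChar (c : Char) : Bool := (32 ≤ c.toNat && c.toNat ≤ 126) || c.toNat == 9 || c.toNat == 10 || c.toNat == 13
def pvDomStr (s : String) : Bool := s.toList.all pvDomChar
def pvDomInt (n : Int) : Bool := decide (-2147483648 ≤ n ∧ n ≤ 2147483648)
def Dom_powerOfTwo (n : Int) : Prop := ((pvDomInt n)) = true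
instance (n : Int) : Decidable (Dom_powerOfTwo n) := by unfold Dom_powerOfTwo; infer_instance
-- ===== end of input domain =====

-- B replaces A's bit-stripping loop by the closed-form lowest-set-bit computation (n & -n, bit_length, one shift).


-- ===== PORT A =====
-- the while loop, with fuel n.natAbs + 1 (d halves each step, so the loop runs at most
-- natAbs n steps when n ≠ 0; the fuel-0 branch is unreachable on Pre_; n = 0, where the
-- Python loops forever, is excluded by Pre_)
def powLoopA : Nat → Int → Int → Int × Int
  | 0, r, d => (r, d)
  | fuel+1, r, d =>
    if PySem.Int.mod d 2 = 0 then powLoopA fuel (r + 1) (d >>> (1 : Nat)) else (r, d)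

def powerOfTwo (n : Int) : Int × Int := powLoopA (n.natAbs + 1) 0 n

-- ===== PORT B =====
-- bit_length of a nonnegative int is Nat.size; for n = 0 Python's r = -1 makes n >> r raise
-- (excluded by Pre_), here Nat subtraction clamps to 0
def powerOfTwo_alt (n : Int) : Int × Int :=
  let m : Int := Int.land n (-n)
  let r : Nat := m.natAbs.size - 1
  ((r : Int), n >>> r)

-- ===== PRECONDITION & SPEC =====
-- on n = 0 the Python A never returns (infinite loop), so it is excluded
def Pre_powerOfTwo (n : Int) : Prop := n ≠ 0
instance (n : Int) : Decidable (Pre_powerOfTwo n) := by unfold Pre_powerOfTwo; infer_instance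
def pvWitness_powerOfTwo : Int := 12

def Spec_powerOfTwo (n : Int) (out : Int × Int) : Prop := out = powerOfTwo_alt n
instance (n : Int) (out : Int × Int) : Decidable (Spec_powerOfTwo n out) := by unfold Spec_powerOfTwo; infer_instance

-- ===== CLAIM (what is proved, stated in full; the proofs are below) =====
def Claim_equal_powerOfTwo : Prop := ∀ (n : Int), Dom_powerOfTwo n → Pre_powerOfTwo n → Spec_powerOfTwo n (powerOfTwo n)

-- ===== LEMMAS AND PROOFS =====

theorem ldiff_pred_of_odd (a : Nat) (h : a % 2 = 1) : Nat.ldiff a (a - 1) = 1 := by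
  apply Nat.eq_of_testBit_eq
  intro i
  rw [Nat.testBit_ldiff]
  cases i with
  | zero =>
      have h3 : (a - 1) % 2 = 0 := by omega
      simp [Nat.testBit_zero, h, h3]
  | succ i =>
      have h2 : (a - 1) / 2 = a / 2 := by omega
      simp only [Nat.testBit_succ, h2]
      simp

theorem ldiff_pred_of_even (b : Nat) (hb : b ≠ 0) :
    Nat.ldiff (2 * b) (2 * b - 1) = 2 * Nat.ldiff b (b - 1) := by
  apply Nat.eq_of_testBit_eq
  intro i
  rw [Nat.testBit_ldiff]
  cases i with
  | zero =>
      have h4 : (2 * b) % 2 = 0 := by omega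
      have h5 : (2 * Nat.ldiff b (b - 1)) % 2 = 0 := by omega
      simp [Nat.testBit_zero, h4, h5]
  | succ i =>
      have h1 : (2 * b) / 2 = b := by omega
      have h2 : (2 * b - 1) / 2 = b - 1 := by omega
      have h3 : (2 * Nat.ldiff b (b - 1)) / 2 = Nat.ldiff b (b - 1) := by omega
      simp only [Nat.testBit_succ, h1, h2, h3]
      rw [Nat.testBit_ldiff]

theorem ldiff_pred_pow (a : Nat) (ha : a ≠ 0) : ∃ v, Nat.ldiff a (a - 1) = 2 ^ v := by
  induction a using Nat.strong_induction_on with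
  | _ a ih =>
    rcases Nat.even_or_odd a with he | ho
    · obtain ⟨b, hb⟩ := he
      have hb2 : a = 2 * b := by omega
      have hbne : b ≠ 0 := by omega
      obtain ⟨v, hv⟩ := ih b (by omega) hbne
      exact ⟨v + 1, by rw [hb2, ldiff_pred_of_even b hbne, hv]; ring⟩
    · exact ⟨0, by simpa using ldiff_pred_of_odd a (Nat.odd_iff.mp ho)⟩

theorem land_neg_self (n : Int) (h : n ≠ 0) :
    Int.land n (-n) = Int.ofNat (Nat.ldiff n.natAbs (n.natAbs - 1)) := by
  cases n with
  | ofNat m =>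
      cases m with
      | zero => exact absurd rfl h
      | succ k =>
          show Int.land (Int.ofNat (k+1)) (Int.negSucc k) = _
          simp [Int.land, Int.natAbs]
  | negSucc m =>
      show Int.land (Int.negSucc m) (Int.ofNat (m+1)) = _
      simp [Int.land, Int.natAbs]

theorem alt_unfold (n : Int) : powerOfTwo_alt n =
    ((((Int.land n (-n)).natAbs.size - 1 : Nat) : Int),
      n >>> ((Int.land n (-n)).natAbs.size - 1)) := rfl

theorem int_shiftRight_zero (d : Int) : d >>> (0 : Nat) = d := by
  cases d <;> rfl

theorem int_shiftRight_two_mul (e : Int) (r : Nat) : (2 * e) >>> (r + 1) = e >>> r := by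
  cases e with
  | ofNat m =>
      have h2 : (2 : Int) * Int.ofNat m = Int.ofNat (2 * m) := by
        show ((2 : Int) * (m : Int)) = ((2 * m : Nat) : Int)
        push_cast; ring
      rw [h2]
      show Int.ofNat ((2 * m) >>> (r + 1)) = Int.ofNat (m >>> r)
      have hm : 2 * m / 2 = m := by omega
      rw [Nat.shiftRight_succ_inside, hm]
  | negSucc m =>
      have h2 : (2 : Int) * Int.negSucc m = Int.negSucc (2 * m + 1) := by
        rw [Int.negSucc_eq, Int.negSucc_eq]; push_cast; ring
      rw [h2]
      show Int.negSucc ((2 * m + 1) >>> (r + 1)) = Int.negSucc (m >>> r)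
      have hm : (2 * m + 1) / 2 = m := by omega
      rw [Nat.shiftRight_succ_inside, hm]

theorem alt_odd (d : Int) (h : d % 2 = 1) : powerOfTwo_alt d = (0, d) := by
  have hd : d ≠ 0 := by omega
  have ha : d.natAbs % 2 = 1 := by omega
  rw [alt_unfold, land_neg_self d hd, ldiff_pred_of_odd d.natAbs ha]
  norm_num [Int.natAbs, Nat.size_one, int_shiftRight_zero]

theorem size_two_mul (x : Nat) (hx : x ≠ 0) : Nat.size (2 * x) = Nat.size x + 1 := by
  have := Nat.size_shiftLeft hx 1
  simpa [Nat.shiftLeft_eq, Nat.mul_comm] using this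

theorem alt_even (e : Int) (he : e ≠ 0) :
    powerOfTwo_alt (2 * e) = ((powerOfTwo_alt e).1 + 1, (powerOfTwo_alt e).2) := by
  have h2e : (2 : Int) * e ≠ 0 := by simp [he]
  have habs : (2 * e).natAbs = 2 * e.natAbs := by
    simpa using Int.natAbs_mul 2 e
  have haene : e.natAbs ≠ 0 := by simpa using he
  obtain ⟨v, hv⟩ := ldiff_pred_pow e.natAbs haene
  have hLne : Nat.ldiff e.natAbs (e.natAbs - 1) ≠ 0 := by
    rw [hv]; positivity
  rw [alt_unfold, alt_unfold, land_neg_self _ h2e, land_neg_self _ he, habs,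
      ldiff_pred_of_even e.natAbs haene]
  have hsz : Nat.size (2 * Nat.ldiff e.natAbs (e.natAbs - 1))
      = Nat.size (Nat.ldiff e.natAbs (e.natAbs - 1)) + 1 := size_two_mul _ hLne
  have hszpos : 1 ≤ Nat.size (Nat.ldiff e.natAbs (e.natAbs - 1)) := by
    rw [hv, Nat.size_pow]; omega
  have hnab : ∀ k : Nat, (Int.ofNat k).natAbs = k := fun k => rfl
  simp only [hnab, hsz]
  refine Prod.ext ?_ ?_
  · show ((Nat.size (Nat.ldiff e.natAbs (e.natAbs - 1)) + 1 - 1 : Nat) : Int)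
      = ((Nat.size (Nat.ldiff e.natAbs (e.natAbs - 1)) - 1 : Nat) : Int) + 1
    omega
  · show (2 * e) >>> (Nat.size (Nat.ldiff e.natAbs (e.natAbs - 1)) + 1 - 1)
      = e >>> (Nat.size (Nat.ldiff e.natAbs (e.natAbs - 1)) - 1)
    rw [show Nat.size (Nat.ldiff e.natAbs (e.natAbs - 1)) + 1 - 1
        = (Nat.size (Nat.ldiff e.natAbs (e.natAbs - 1)) - 1) + 1 from by omega]
    exact int_shiftRight_two_mul e _

theorem loopA_eq_alt (k : Nat) : ∀ d : Int, d.natAbs ≤ k → d ≠ 0 →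
    ∀ fuel, d.natAbs ≤ fuel → ∀ r : Int,
      powLoopA fuel r d = (r + (powerOfTwo_alt d).1, (powerOfTwo_alt d).2) := by
  induction k with
  | zero => intro d hk hd; exact absurd (Int.natAbs_eq_zero.mp (by omega)) hd
  | succ k ih =>
    intro d hk hd fuel hfuel r
    have h1 : 1 ≤ d.natAbs := by omega
    obtain ⟨f, rfl⟩ : ∃ f, fuel = f + 1 := ⟨fuel - 1, by omega⟩
    rcases Int.emod_two_eq d with hpar | hpar
    · -- even
      obtain ⟨e, rfl⟩ : ∃ e, d = 2 * e := by
        obtain ⟨e, he⟩ := Int.dvd_of_emod_eq_zero hpar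
        exact ⟨e, he⟩
      have he0 : e ≠ 0 := by rintro rfl; simp at hd
      have hmod : PySem.Int.mod (2 * e) 2 = 0 :=
        (PySem.Int.mod_eq_zero_iff_dvd _ _).mpr ⟨e, rfl⟩
      have hshift : (2 * e) >>> (1 : Nat) = e := by
        have := int_shiftRight_two_mul e 0
        simpa [int_shiftRight_zero] using this
      have habs : (2 * e).natAbs = 2 * e.natAbs := Int.natAbs_mul 2 e
      have heabs : 1 ≤ e.natAbs := by
        have := Int.natAbs_pos.mpr he0; omega
      rw [powLoopA, if_pos hmod, hshift,
          ih e (by omega) he0 f (by omega) (r + 1), alt_even e he0]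
      simp; ring
    · -- odd
      have hmod : ¬ PySem.Int.mod d 2 = 0 := by
        rw [PySem.Int.mod_eq_zero_iff_dvd]
        intro hdvd
        have := Int.emod_emod_of_dvd d (dvd_refl 2)
        omega
      rw [powLoopA, if_neg hmod, alt_odd d hpar]
      simp

-- ===== VERDICT (by name: the statement is the Claim_ definition above) =====
theorem powerOfTwo_spec : Claim_equal_powerOfTwo := by
  intro n _ hn
  unfold Spec_powerOfTwo powerOfTwo
  rw [loopA_eq_alt n.natAbs n le_rfl hn (n.natAbs + 1) (by omega) 0]
  simp
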